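-- pv_equiv track=rewrite | github.com/maxarnab/Website-Visitor-Tracking-System | main.py | track_unique_visitors
-- ===== SOURCE A (Python) =====
-- def track_unique_visitors(visits):
--     # Remove duplicate tuples
--     unique_visits = list(set(visits))
--
--     # Count unique users for each website
--     website_users = {}
--
--     for user, site in unique_visits:
--         if site not in website_users:  #check whether we already have an entry for this website.
--             website_users[site] = set() #when website key is missing, create it as an empty set to collectuser IDs.
--         website_users[site].add(user)  # add the current user ID to the set for that site.
--
--     # Returning list of tuples (website, unique_count)
--     return [(site, len(users)) for site, users in website_users.items()]
-- ===== SOURCE B (Python) =====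
-- def track_unique_visitors(visits):
--     # Staged: dedupe visits, list the sites in first-occurrence order,
--     # then count per site with an inner scan (each distinct (user, site)
--     # tuple contributes exactly one unique user to its site).
--     uniq = list(set(visits))
--     sites = list(dict.fromkeys(site for _, site in uniq))
--     return [(site, sum(1 for _, s in uniq if s == site)) for site in sites]
-- ===== Notes on version B (the rewrite author's own statement) =====
-- stated objective: alternative
-- what changed: Replaces the single-pass dict-of-sets accumulation with staged passes: dedupe the visits, extract the site list in first-occurrence order, then compute each site's unique-user count by an inner scan over the deduped tuples (valid because distinct (user,site) tuples per site equal the unique users); trades O(n) dict accumulation for an O(n*k) scan per site.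
import Mathlib
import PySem

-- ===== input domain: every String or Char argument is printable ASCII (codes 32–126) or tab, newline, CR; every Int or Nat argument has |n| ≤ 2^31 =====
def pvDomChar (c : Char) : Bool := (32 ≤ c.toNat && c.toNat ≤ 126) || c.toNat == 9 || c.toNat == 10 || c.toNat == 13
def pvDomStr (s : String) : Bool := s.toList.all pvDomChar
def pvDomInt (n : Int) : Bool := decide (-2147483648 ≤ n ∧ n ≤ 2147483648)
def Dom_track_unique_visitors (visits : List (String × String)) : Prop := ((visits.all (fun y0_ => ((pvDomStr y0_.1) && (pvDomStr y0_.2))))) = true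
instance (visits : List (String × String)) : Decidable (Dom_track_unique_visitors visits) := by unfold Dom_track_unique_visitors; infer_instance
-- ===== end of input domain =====

-- B replaces A's single-pass dict-of-sets accumulation by staged passes: dedupe, list the
-- sites in first-occurrence order, then an inner counting scan per site (alternative).
-- Python's iteration order over set(visits) is hash-dependent and not modelled: both ports
-- use first-occurrence order for it.

-- ===== PORT A =====
def track_unique_visitors (visits : List (String × String)) : List (String × Int) :=
  -- unique_visits = list(set(visits))
  let unique_visits : List (String × String) := PySem.Set.ofList visits
  -- for user, site in unique_visits: if site not in website_users: … ; website_users[site].add(user)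
  let website_users : PySem.Dict String (PySem.Set String) :=
    unique_visits.foldl (fun d x =>
      let d := if d.contains x.2 then d else d.insert x.2 PySem.Set.empty
      -- website_users[site].add(user): look the set up, add, store back in place
      d.insert x.2 (PySem.Set.add (d.getD x.2 PySem.Set.empty) x.1))
      PySem.Dict.empty
  website_users.items.map (fun p => (p.1, (PySem.Set.len p.2 : Int)))

-- ===== PORT B =====
def track_unique_visitors_alt (visits : List (String × String)) : List (String × Int) :=
  -- uniq = list(set(visits))
  let uniq : List (String × String) := PySem.Set.ofList visits
  -- sites = list(dict.fromkeys(site for _, site in uniq))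
  let sites : List String := PySem.List.dedup (uniq.map Prod.snd)
  -- [(site, sum(1 for _, s in uniq if s == site)) for site in sites]
  sites.map (fun site => (site, (uniq.countP (fun p => p.2 == site) : Int)))

-- ===== PRECONDITION & SPEC =====
def Spec_track_unique_visitors (visits : List (String × String)) (out : List (String × Int)) : Prop := out = track_unique_visitors_alt visits
instance (visits : List (String × String)) (out : List (String × Int)) : Decidable (Spec_track_unique_visitors visits out) := by unfold Spec_track_unique_visitors; infer_instance

-- ===== CLAIM =====
def Claim_equal_track_unique_visitors : Prop := ∀ (visits : List (String × String)), Dom_track_unique_visitors visits → Spec_track_unique_visitors visits (track_unique_visitors visits)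

-- ===== LEMMAS AND PROOFS =====

-- A's loop step, named so the invariant can speak about it
def pvStepA (d : PySem.Dict String (PySem.Set String)) (x : String × String) :
    PySem.Dict String (PySem.Set String) :=
  let d := if d.contains x.2 then d else d.insert x.2 PySem.Set.empty
  d.insert x.2 (PySem.Set.add (d.getD x.2 PySem.Set.empty) x.1)

-- Invariant: after folding pvStepA over a duplicate-free list l from the empty dict,
-- the dict's items are the sites of l in first-occurrence order, each paired with
-- the users of that site's entries of l, in order.
theorem pv_items (l : List (String × String)) (hl : l.Nodup) :
    (l.foldl pvStepA PySem.Dict.empty).items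
      = (PySem.Set.ofList (l.map Prod.snd)).map
          (fun s => (s, (l.filter (fun p => p.2 == s)).map Prod.fst)) := by
  induction l using List.reverseRecOn with
  | nil => rfl
  | append_singleton t x ih =>
    have hl2 : t.Nodup := (List.nodup_append.mp hl).1
    have hxt : x ∉ t := by
      have h := (List.nodup_append.mp hl).2.2
      exact fun hm => h x hm x List.mem_cons_self rfl
    have hit := ih hl2
    have hkeys : (t.foldl pvStepA PySem.Dict.empty).keys
        = PySem.Set.ofList (t.map Prod.snd) := by
      simp [PySem.Dict.keys, hit, List.map_map, Function.comp_def]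
    have hnd : (t.foldl pvStepA PySem.Dict.empty).keys.Nodup := by
      rw [hkeys]; exact PySem.Set.nodup_ofList _
    set d := t.foldl pvStepA PySem.Dict.empty with hd
    rw [List.foldl_append, List.foldl_cons, List.foldl_nil, ← hd]
    by_cases h : d.contains x.2 = true
    · -- site already a key
      have hmemK : x.2 ∈ PySem.Set.ofList (t.map Prod.snd) := by
        rw [← hkeys]; exact (PySem.Dict.contains_iff_mem_keys _ _).mp h
      have hmemI : (x.2, (t.filter (fun p => p.2 == x.2)).map Prod.fst) ∈ d.items := by
        rw [hit]; exact List.mem_map_of_mem hmemK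
      have hgd : d.getD x.2 PySem.Set.empty
          = (t.filter (fun p => p.2 == x.2)).map Prod.fst :=
        PySem.Dict.getD_of_mem_items _ hmemI hnd _
      have hxnot : x.1 ∉ (t.filter (fun p => p.2 == x.2)).map Prod.fst := by
        intro hm
        obtain ⟨p, hp, hp1⟩ := List.mem_map.mp hm
        have hp2 : p.2 = x.2 := by simpa using (List.mem_filter.mp hp).2
        have : p = x := Prod.ext_iff.mpr ⟨hp1, hp2⟩
        exact hxt (this ▸ (List.mem_filter.mp hp).1)
      have hadd : PySem.Set.add (d.getD x.2 PySem.Set.empty) x.1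
          = (t.filter (fun p => p.2 == x.2)).map Prod.fst ++ [x.1] := by
        rw [hgd]; simp [PySem.Set.add, hxnot]
      have hofl : PySem.Set.ofList ((t ++ [x]).map Prod.snd)
          = PySem.Set.ofList (t.map Prod.snd) := by
        show ((t ++ [x]).map Prod.snd).foldl PySem.Set.add [] = _
        rw [List.map_append, List.foldl_append]
        have hc : PySem.Set.contains (PySem.Set.ofList (t.map Prod.snd)) x.2 = true :=
          (PySem.Set.contains_iff _ _).mpr hmemK
        show PySem.Set.add (PySem.Set.ofList (t.map Prod.snd)) x.2 = _
        simp only [PySem.Set.add, hc, if_true]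
      rw [pvStepA, if_pos h]
      rw [hadd, PySem.Dict.items_insert_of_contains _ _ h, hit, hofl, List.map_map]
      apply List.map_congr_left
      intro s hs
      by_cases hsk : s = x.2
      · subst hsk
        simp [List.filter_append]
      · have hne : (s == x.2) = false := by simpa using hsk
        simp only [Function.comp, hne, Bool.false_eq_true, if_false]
        rw [List.filter_append]
        have : (x.2 == s) = false := by simpa using (Ne.symm hsk)
        simp [this]
    · -- new site
      have h' : d.contains x.2 = false := by
        cases hcc : d.contains x.2 with
        | true => exact absurd hcc h
        | false => rfl
      have hnk : x.2 ∉ PySem.Set.ofList (t.map Prod.snd) := by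
        intro hm
        exact h ((PySem.Dict.contains_iff_mem_keys _ _).mpr (hkeys ▸ hm))
      have hfilt : t.filter (fun p => p.2 == x.2) = [] := by
        rw [List.filter_eq_nil_iff]
        intro p hp hpe
        have hp2 : p.2 = x.2 := by simpa using hpe
        exact hnk ((PySem.Set.mem_ofList _ _).mpr (hp2 ▸ List.mem_map_of_mem hp))
      have hstep : pvStepA d x = d.insert x.2 [x.1] := by
        simp [pvStepA, h', PySem.Dict.getD_insert_self, PySem.Dict.insert_insert_self,
          PySem.Set.add, PySem.Set.empty]
      have hc2 : (d.insert x.2 PySem.Set.empty).contains x.2 = true :=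
        PySem.Dict.contains_insert_self _ _ _
      have hofl : PySem.Set.ofList ((t ++ [x]).map Prod.snd)
          = PySem.Set.ofList (t.map Prod.snd) ++ [x.2] := by
        show ((t ++ [x]).map Prod.snd).foldl PySem.Set.add [] = _
        rw [List.map_append, List.foldl_append]
        have hc : PySem.Set.contains (PySem.Set.ofList (t.map Prod.snd)) x.2 = false := by
          cases hcc : PySem.Set.contains (PySem.Set.ofList (t.map Prod.snd)) x.2 with
          | true => exact absurd ((PySem.Set.contains_iff _ _).mp hcc) hnk
          | false => rfl
        show PySem.Set.add (PySem.Set.ofList (t.map Prod.snd)) x.2 = _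
        simp only [PySem.Set.add, hc, Bool.false_eq_true, if_false]
      rw [hstep, PySem.Dict.items_insert_of_not_contains _ _ h', hit, hofl,
        List.map_append]
      congr 1
      · apply List.map_congr_left
        intro s hs
        have hne : s ≠ x.2 := fun he => hnk (he ▸ hs)
        rw [List.filter_append]
        have : (x.2 == s) = false := by simpa using (Ne.symm hne)
        simp [this]
      · simp [List.filter_append, hfilt]

-- ===== VERDICT =====
theorem track_unique_visitors_spec : Claim_equal_track_unique_visitors := by
  intro visits _
  unfold Spec_track_unique_visitors track_unique_visitors track_unique_visitors_alt
  dsimp only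
  rw [show (fun (d : PySem.Dict String (PySem.Set String)) (x : String × String) =>
      let d := if d.contains x.2 then d else d.insert x.2 PySem.Set.empty
      d.insert x.2 (PySem.Set.add (d.getD x.2 PySem.Set.empty) x.1)) = pvStepA from rfl]
  rw [pv_items (PySem.Set.ofList visits) (PySem.Set.nodup_ofList visits)]
  rw [PySem.List.dedup_eq_ofList, List.map_map]
  apply List.map_congr_left
  intro s hs
  simp [Function.comp, PySem.Set.len, List.countP_eq_length_filter]
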